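-- pv_equiv track=rewrite | github.com/HaardTrivedi/ITI1120 | Assignments/Assignment 2/a2_part_2_300021545.py | countMembers
-- ===== SOURCE A (Python) =====
-- def countMembers(s):
--     '''(string) -> integer
--     Preconditions: Enter string in quatations marks
--     The function returns the number of extraordinary characters from string entered'''
--     l = list(s)
--     x = 0
--     for i in range(len(l)):
--         if l[i] >= 'e' and l[i] <= 'j':
--             x+=1
--         elif l[i] >= 'F' and l[i] <= 'X':
--             x+=1
--         elif l[i] >= str(2) and l[i] <= str(6):
--             x+=1
--         elif l[i] == '!' or l[i] == ',' or l[i] == '\\':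
--             x+=1
--     return x
-- ===== SOURCE B (Python) =====
-- def countMembers(s):
--     # Instead of testing each character of s against the four range conditions,
--     # iterate over the alphabet of qualifying characters and sum the number of
--     # occurrences of each in s (valid since a character matches at most one branch
--     # and each qualifying character is enumerated exactly once).
--     total = 0
--     for lo, hi in (('e', 'j'), ('F', 'X'), ('2', '6')):
--         for code in range(ord(lo), ord(hi) + 1):
--             total += s.count(chr(code))
--     for sym in ('!', ',', '\\'):
--         total += s.count(sym)
--     return total
-- ===== Notes on version B (the rewrite author's own statement) =====
-- stated objective: faster
-- what changed: B inverts the traversal: instead of one Python-level pass over s testing each character against the four elif range conditions, it enumerates the 33-character alphabet of qualifying characters (three ordinal ranges plus three symbols) and sums s.count(ch) over them, each scan running in C.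
import Mathlib
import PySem

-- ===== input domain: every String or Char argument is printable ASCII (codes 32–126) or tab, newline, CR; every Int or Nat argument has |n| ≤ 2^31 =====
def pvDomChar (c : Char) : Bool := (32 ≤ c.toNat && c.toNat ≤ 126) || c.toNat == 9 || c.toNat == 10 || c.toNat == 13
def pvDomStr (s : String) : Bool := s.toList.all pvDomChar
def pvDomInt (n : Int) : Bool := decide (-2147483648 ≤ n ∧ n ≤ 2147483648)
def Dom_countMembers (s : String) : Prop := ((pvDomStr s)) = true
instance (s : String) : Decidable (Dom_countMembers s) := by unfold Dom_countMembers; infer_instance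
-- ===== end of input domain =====

-- B inverts the traversal: instead of one pass over s testing each character against
-- the four elif range conditions, it enumerates the 33 qualifying characters and sums
-- s.count(ch) over that alphabet (objective: alternative).

-- ===== PORT A =====
-- the body of A's loop: the four-branch elif chain, updating the counter x
def stepA (x : Int) (c : Char) : Int :=
  if 'e' ≤ c ∧ c ≤ 'j' then x + 1
  else if 'F' ≤ c ∧ c ≤ 'X' then x + 1
  else if '2' ≤ c ∧ c ≤ '6' then x + 1   -- str(2) = "2", str(6) = "6"
  else if c = '!' ∨ c = ',' ∨ c = '\\' then x + 1
  else x

def countMembers (s : String) : Int :=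
  let l := s.toList
  (PySem.List.pyRange 0 (PySem.List.len l) 1).foldl
    (fun x i => stepA x (PySem.List.pyGetD l i ' ')) 0

-- ===== PORT B =====
def countMembers_alt (s : String) : Int :=
  -- for lo, hi in (('e','j'), ('F','X'), ('2','6')): for code in range(ord(lo), ord(hi)+1): total += s.count(chr(code))
  let t1 := ([('e', 'j'), ('F', 'X'), ('2', '6')] : List (Char × Char)).foldl
    (fun total p =>
      (PySem.List.pyRange (p.1.toNat : Int) ((p.2.toNat : Int) + 1) 1).foldl
        (fun tot code => tot + (PySem.Str.count s (String.ofList [Char.ofNat code.toNat]) : Int))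
        total) 0
  -- for sym in ('!', ',', '\\'): total += s.count(sym)
  (['!', ',', '\\'] : List Char).foldl
    (fun tot sym => tot + (PySem.Str.count s (String.ofList [sym]) : Int)) t1

-- ===== PRECONDITION & SPEC =====
def Spec_countMembers (s : String) (out : Int) : Prop := out = countMembers_alt s
instance (s : String) (out : Int) : Decidable (Spec_countMembers s out) := by unfold Spec_countMembers; infer_instance

-- ===== CLAIM (what is proved, stated in full; the proofs are below) =====
def Claim_equal_countMembers : Prop := ∀ (s : String), Dom_countMembers s → Spec_countMembers s (countMembers s)

-- ===== LEMMAS AND PROOFS =====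

-- the 33 qualifying characters, in B's enumeration order
def validList : List Char :=
  ['e','f','g','h','i','j',
   'F','G','H','I','J','K','L','M','N','O','P','Q','R','S','T','U','V','W','X',
   '2','3','4','5','6','!',',','\\']

-- Python s.count(c) for a single character c is the character count
lemma countGo_single (c : Char) :
    ∀ (l : List Char) (fuel acc : Nat), l.length ≤ fuel →
      PySem.Chars.count.go [c] fuel l acc = acc + l.count c := by
  intro l
  induction l with
  | nil => intro fuel acc _; cases fuel <;> simp [PySem.Chars.count.go]
  | cons h t ih =>
      intro fuel acc hf
      cases fuel with
      | zero => simp at hf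
      | succ f =>
          simp only [List.length_cons] at hf
          by_cases hc : h = c
          · subst hc
            simp only [PySem.Chars.count.go, List.isPrefixOf, beq_self_eq_true,
              Bool.true_and, if_true, List.length_cons, List.length_nil,
              List.drop_succ_cons, List.drop_zero]
            rw [ih f (acc + 1) (by omega)]
            simp [List.count_cons]
            omega

          · have hp : ([c].isPrefixOf (h :: t)) = false := by
              simp [List.isPrefixOf]
              exact fun he => hc he.symm
            simp only [PySem.Chars.count.go, hp, if_neg Bool.false_ne_true]
            rw [ih f acc (by omega)]
            simp [hc]

lemma count_single (l : List Char) (c : Char) :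
    PySem.Chars.count l [c] = l.count c := by
  simp only [PySem.Chars.count, List.isEmpty_cons, if_neg Bool.false_ne_true]
  rw [countGo_single c l l.length 0 le_rfl]
  simp

-- summing a 0/1 indicator over a duplicate-free list
lemma sum_indicator (ch : Char) :
    ∀ (V : List Char), V.Nodup →
      (V.map (fun v => if ch = v then (1 : Int) else 0)).sum
        = if V.contains ch then (1 : Int) else 0 := by
  intro V
  induction V with
  | nil => simp
  | cons v t ih =>
      intro hnd
      simp only [List.nodup_cons] at hnd
      by_cases hv : ch = v
      · subst hv
        simp [ih hnd.2, List.contains_eq_mem, hnd.1]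
      · simp [hv, ih hnd.2, List.contains_eq_mem, Ne.symm hv]

-- summing per-character counts over the alphabet = counting membership over the string
lemma sum_count_eq_countP (V : List Char) (hV : V.Nodup) :
    ∀ (l : List Char),
      (V.map (fun v => (l.count v : Int))).sum = (l.countP (fun c => V.contains c) : Int) := by
  intro l
  induction l with
  | nil => simp
  | cons ch t ih =>
      have h1 : (V.map (fun v => ((ch :: t).count v : Int))).sum
          = (V.map (fun v => (t.count v : Int))).sum
            + (V.map (fun v => if ch = v then (1 : Int) else 0)).sum := by
        rw [← List.sum_map_add]
        refine congrArg List.sum (List.map_congr_left ?_)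
        intro v _
        by_cases hv : ch = v <;> simp [List.count_cons, hv] <;> push_cast <;> ring
      rw [h1, ih, sum_indicator ch V hV, List.countP_cons]
      by_cases hm : V.contains ch <;> simp [hm] <;> push_cast <;> ring

-- A's branch condition is membership in the qualifying alphabet
lemma branch_iff (c : Char) :
    (('e' ≤ c ∧ c ≤ 'j') ∨ ('F' ≤ c ∧ c ≤ 'X') ∨ ('2' ≤ c ∧ c ≤ '6') ∨
        (c = '!' ∨ c = ',' ∨ c = '\\')) ↔ validList.contains c = true := by
  simp [validList, List.contains_eq_mem, List.mem_cons, Char.le_def, Char.ext_iff,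
        UInt32.le_iff_toNat_le, UInt32.ext_iff]
  omega

-- A's step is a 0/1 indicator update
lemma step_eq (x : Int) (c : Char) :
    stepA x c = if validList.contains c then x + 1 else x := by
  have h := branch_iff c
  unfold stepA
  split_ifs <;> simp_all

-- A's result is countP over the string
lemma countMembers_eq_countP (s : String) :
    countMembers s = (s.toList.countP (fun c => validList.contains c) : Int) := by
  unfold countMembers
  rw [PySem.List.foldl_pyRange_zero_pyGetD]
  have hstep : (fun (x : Int) (c : Char) => stepA x c) =
      fun (x : Int) (c : Char) => if validList.contains c then x + 1 else x :=
    funext fun x => funext fun c => step_eq x c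
  simp only [hstep]
  rw [PySem.List.foldl_if_add_one]
  simp only [zero_add]

-- B's nested folds expand to the fold over validList
lemma countMembers_alt_eq_sum (s : String) :
    countMembers_alt s = (validList.map (fun v => (s.toList.count v : Int))).sum := by
  have h1 : PySem.List.pyRange ('e'.toNat : Int) (('j'.toNat : Int) + 1) 1
      = [101, 102, 103, 104, 105, 106] := by decide
  have h2 : PySem.List.pyRange ('F'.toNat : Int) (('X'.toNat : Int) + 1) 1 =
      [70, 71, 72, 73, 74, 75, 76, 77, 78, 79, 80, 81, 82, 83, 84, 85, 86, 87, 88] := by decide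
  have h3 : PySem.List.pyRange ('2'.toNat : Int) (('6'.toNat : Int) + 1) 1
      = [50, 51, 52, 53, 54] := by decide
  unfold countMembers_alt
  simp only [List.foldl_cons, List.foldl_nil]
  rw [h1, h2, h3]
  simp only [List.foldl_cons, List.foldl_nil, PySem.Str.count_eq]
  simp only [String.toList_ofList]
  simp only [count_single,
    show Char.ofNat (Int.toNat 101) = 'e' from by decide,
    show Char.ofNat (Int.toNat 102) = 'f' from by decide,
    show Char.ofNat (Int.toNat 103) = 'g' from by decide,
    show Char.ofNat (Int.toNat 104) = 'h' from by decide,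
    show Char.ofNat (Int.toNat 105) = 'i' from by decide,
    show Char.ofNat (Int.toNat 106) = 'j' from by decide,
    show Char.ofNat (Int.toNat 70) = 'F' from by decide,
    show Char.ofNat (Int.toNat 71) = 'G' from by decide,
    show Char.ofNat (Int.toNat 72) = 'H' from by decide,
    show Char.ofNat (Int.toNat 73) = 'I' from by decide,
    show Char.ofNat (Int.toNat 74) = 'J' from by decide,
    show Char.ofNat (Int.toNat 75) = 'K' from by decide,
    show Char.ofNat (Int.toNat 76) = 'L' from by decide,
    show Char.ofNat (Int.toNat 77) = 'M' from by decide,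
    show Char.ofNat (Int.toNat 78) = 'N' from by decide,
    show Char.ofNat (Int.toNat 79) = 'O' from by decide,
    show Char.ofNat (Int.toNat 80) = 'P' from by decide,
    show Char.ofNat (Int.toNat 81) = 'Q' from by decide,
    show Char.ofNat (Int.toNat 82) = 'R' from by decide,
    show Char.ofNat (Int.toNat 83) = 'S' from by decide,
    show Char.ofNat (Int.toNat 84) = 'T' from by decide,
    show Char.ofNat (Int.toNat 85) = 'U' from by decide,
    show Char.ofNat (Int.toNat 86) = 'V' from by decide,
    show Char.ofNat (Int.toNat 87) = 'W' from by decide,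
    show Char.ofNat (Int.toNat 88) = 'X' from by decide,
    show Char.ofNat (Int.toNat 50) = '2' from by decide,
    show Char.ofNat (Int.toNat 51) = '3' from by decide,
    show Char.ofNat (Int.toNat 52) = '4' from by decide,
    show Char.ofNat (Int.toNat 53) = '5' from by decide,
    show Char.ofNat (Int.toNat 54) = '6' from by decide]
  simp [validList]
  ring

-- ===== VERDICT (by name: the statement is the Claim_ definition above) =====
theorem countMembers_spec : Claim_equal_countMembers := by
  intro s _
  unfold Spec_countMembers
  rw [countMembers_eq_countP, countMembers_alt_eq_sum,
      sum_count_eq_countP validList (by decide) s.toList]
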